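-- pv_equiv track=rewrite | github.com/jlemus1234/Concurrent_Scrabble | final/game.py | over_lap_center
-- ===== SOURCE A (Python) =====
-- def over_lap_center(word, positon, direction):
--     length = len(word)
--     for i in range(length):
--         if positon == (7,7):
--             return True
--         # If word is in a column, update row to get to next letter in word
--         if direction == 'd':
--             positon = (positon[0] + 1, positon[1])
--         # If word is in a row, update column to get to next letter in word
--         else:
--             postion = (positon[0] , positon[1] + 1)
--     return False
-- ===== SOURCE B (Python) =====
-- def over_lap_center(word, positon, direction):
--     # closed-form: the word occupies a contiguous segment starting at positon
--     if not word:
--         return False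
--     row, col = positon
--     if direction == 'd':
--         return col == 7 and row <= 7 < row + len(word)
--     return row == 7 and col <= 7 < col + len(word)
-- ===== Notes on version B (the rewrite author's own statement) =====
-- stated objective: faster
-- what changed: replaces the per-letter walking loop with a closed-form interval test (does the word's segment contain (7,7)) and fixes A's typo ('postion') that keeps the position from ever advancing in the horizontal branch
-- intended difference: for horizontal words (direction != 'd') starting at row 7, column < 7, whose segment reaches column 7, A returns False because the else-branch assigns the misspelled variable 'postion' and never advances, while B returns True, which is the intended 'path crosses center' answer. — e.g. on over_lap_center("ab", (7, 6), "r"): A returns false, B returns true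
import Mathlib
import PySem

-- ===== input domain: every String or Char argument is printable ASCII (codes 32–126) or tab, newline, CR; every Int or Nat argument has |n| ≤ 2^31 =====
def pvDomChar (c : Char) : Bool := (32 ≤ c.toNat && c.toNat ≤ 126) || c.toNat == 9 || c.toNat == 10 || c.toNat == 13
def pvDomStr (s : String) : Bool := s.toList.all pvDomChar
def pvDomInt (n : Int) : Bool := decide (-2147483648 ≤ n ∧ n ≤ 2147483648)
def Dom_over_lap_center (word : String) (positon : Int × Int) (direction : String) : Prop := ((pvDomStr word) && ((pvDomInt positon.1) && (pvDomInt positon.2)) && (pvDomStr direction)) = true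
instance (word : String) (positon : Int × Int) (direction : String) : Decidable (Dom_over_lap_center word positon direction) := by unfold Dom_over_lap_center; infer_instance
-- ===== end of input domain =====

-- B replaces A's per-letter walking loop by an O(1) closed-form interval test and
-- fixes A's 'postion' typo that stops the horizontal branch from ever advancing.

-- ===== PORT A =====
-- one loop iteration per letter; in the else branch A assigns the misspelled
-- variable 'postion' (dead store), so the position is left UNCHANGED — the port
-- faithfully leaves p unchanged there.
def olcLoopA : Nat → (Int × Int) → String → Bool
  | 0, _, _ => false
  | Nat.succ n, p, d =>
    if p = (7, 7) then true
    else olcLoopA n (if d = "d" then (p.1 + 1, p.2) else p) d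

def over_lap_center (word : String) (positon : Int × Int) (direction : String) : Bool :=
  olcLoopA word.toList.length positon direction

-- ===== PORT B =====
def over_lap_center_alt (word : String) (positon : Int × Int) (direction : String) : Bool :=
  if word.toList.length = 0 then false
  else if direction = "d" then
    decide (positon.2 = 7 ∧ positon.1 ≤ 7 ∧ 7 < positon.1 + (word.toList.length : Int))
  else
    decide (positon.1 = 7 ∧ positon.2 ≤ 7 ∧ 7 < positon.2 + (word.toList.length : Int))

-- ===== PRECONDITION & SPEC =====
-- For horizontal words (direction ≠ 'd') starting at row 7, column < 7, whose segment reaches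
-- column 7, A returns False (the typo'd else branch never advances the position) while B
-- returns True, which is the intended "path crosses center" answer.
def D_over_lap_center (word : String) (positon : Int × Int) (direction : String) : Prop :=
  match positon with
  | (row, col) => direction ≠ "d" ∧ row = 7 ∧ col < 7 ∧ (7 - col).toNat < word.toList.length
instance (word : String) (positon : Int × Int) (direction : String) : Decidable (D_over_lap_center word positon direction) := by unfold D_over_lap_center; infer_instance

def Spec_over_lap_center (word : String) (positon : Int × Int) (direction : String) (out : Bool) : Prop := ¬ D_over_lap_center word positon direction → out = over_lap_center_alt word positon direction
instance (word : String) (positon : Int × Int) (direction : String) (out : Bool) : Decidable (Spec_over_lap_center word positon direction out) := by unfold Spec_over_lap_center; infer_instance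

def pvDiffWitness_over_lap_center : String × (Int × Int) × String := ("ab", (7, 6), "r")
def pvDiffWitnessOut_over_lap_center : Bool × Bool := (false, true)

-- ===== CLAIM (what is proved, stated in full; the proofs are below) =====
def Claim_unchanged_over_lap_center : Prop := ∀ (word : String) (positon : Int × Int) (direction : String), Dom_over_lap_center word positon direction → Spec_over_lap_center word positon direction (over_lap_center word positon direction)
def Claim_changed_over_lap_center : Prop := Dom_over_lap_center (pvDiffWitness_over_lap_center.1) (pvDiffWitness_over_lap_center.2.1) (pvDiffWitness_over_lap_center.2.2) ∧ D_over_lap_center (pvDiffWitness_over_lap_center.1) (pvDiffWitness_over_lap_center.2.1) (pvDiffWitness_over_lap_center.2.2) ∧ over_lap_center (pvDiffWitness_over_lap_center.1) (pvDiffWitness_over_lap_center.2.1) (pvDiffWitness_over_lap_center.2.2) = pvDiffWitnessOut_over_lap_center.1 ∧ over_lap_center_alt (pvDiffWitness_over_lap_center.1) (pvDiffWitness_over_lap_center.2.1) (pvDiffWitness_over_lap_center.2.2) = pvDiffWitnessOut_over_lap_center.2 ∧ pvDiffWitnessOut_over_lap_center.1 ≠ pvDiffWitnessOut_over_lap_c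enter.2
def Claim_exact_over_lap_center : Prop := ∀ (word : String) (positon : Int × Int) (direction : String), Dom_over_lap_center word positon direction → D_over_lap_center word positon direction → over_lap_center word positon direction ≠ over_lap_center_alt word positon direction

-- ===== LEMMAS AND PROOFS =====

-- vertical walk: the row advances each step, so the loop finds (7,7) iff the column is 7
-- and row 7 lies in [r, r+n)
theorem olcLoopA_d (n : Nat) : ∀ r c : Int,
    olcLoopA n (r, c) "d" = decide (c = 7 ∧ r ≤ 7 ∧ 7 < r + (n : Int)) := by
  induction n with
  | zero =>
    intro r c
    simp only [olcLoopA, Nat.cast_zero, add_zero]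
    symm
    simp only [decide_eq_false_iff_not]
    rintro ⟨_, h1, h2⟩; omega
  | succ m ih =>
    intro r c
    simp only [olcLoopA, if_true]
    by_cases h : (r, c) = ((7 : Int), (7 : Int))
    · rw [if_pos h]
      have hr : r = 7 := congrArg Prod.fst h
      have hc : c = 7 := congrArg Prod.snd h
      subst hr; subst hc
      symm
      simp only [decide_eq_true_iff]
      refine ⟨by trivial, by omega, by push_cast; omega⟩
    · rw [if_neg h, ih (r + 1) c]
      simp only [decide_eq_decide]
      have h' : r ≠ 7 ∨ c ≠ 7 := by
        by_contra hx
        push Not at hx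
        exact h (by rw [hx.1, hx.2])
      push_cast
      constructor
      · rintro ⟨hc, h1, h2⟩; exact ⟨hc, by omega, by omega⟩
      · rintro ⟨hc, h1, h2⟩
        subst hc
        have hr : r ≠ 7 := by tauto
        exact ⟨rfl, by omega, by omega⟩

-- non-'d' walk: the typo'd branch never moves the position, so the loop succeeds iff it
-- runs at least once at (7,7)
theorem olcLoopA_nd (n : Nat) (p : Int × Int) (d : String) (hd : d ≠ "d") :
    olcLoopA n p d = decide (0 < n ∧ p = (7, 7)) := by
  induction n with
  | zero => simp [olcLoopA]
  | succ m ih =>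
    simp only [olcLoopA]
    rw [if_neg hd]
    by_cases h : p = ((7 : Int), (7 : Int))
    · rw [if_pos h]
      symm
      simp [h]
    · rw [if_neg h, ih]
      simp [h]

-- ===== VERDICT (by name: the statement is the Claim_ definition above) =====
theorem over_lap_center_spec : Claim_unchanged_over_lap_center := by
  intro word positon direction _ hnD
  obtain ⟨r, c⟩ := positon
  unfold over_lap_center over_lap_center_alt
  by_cases hd : direction = "d"
  · subst hd
    rw [olcLoopA_d]
    by_cases h0 : word.toList.length = 0
    · rw [if_pos h0, h0]
      simp only [Nat.cast_zero, add_zero, decide_eq_false_iff_not]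
      rintro ⟨_, h1, h2⟩; omega
    · rw [if_neg h0, if_pos rfl]
  · rw [olcLoopA_nd _ _ _ hd]
    by_cases h0 : word.toList.length = 0
    · rw [if_pos h0, h0]
      simp
    · rw [if_neg h0, if_neg hd]
      have hD : ¬(r = 7 ∧ c < 7 ∧ 7 < c + (word.toList.length : Int)) :=
        fun hx => hnD ⟨hd, hx.1, hx.2.1, by have h1 := hx.2.1; have h2 := hx.2.2; omega⟩
      rw [decide_eq_decide]
      constructor
      · rintro ⟨hn0, hp⟩
        have hr : r = 7 := congrArg Prod.fst hp
        have hc : c = 7 := congrArg Prod.snd hp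
        subst hr; subst hc
        exact ⟨rfl, le_refl _, by show (7:Int) < 7 + word.toList.length; omega⟩
      · rintro ⟨hr, hc7, hlt⟩
        have hr' : r = 7 := hr
        have hc7' : c ≤ 7 := hc7
        have hlt' : (7:Int) < c + word.toList.length := hlt
        subst hr'
        have hc : c = 7 := by
          by_contra hne
          exact hD ⟨rfl, by omega, hlt'⟩
        subst hc
        exact ⟨by omega, rfl⟩

theorem over_lap_center_changed : Claim_changed_over_lap_center := by
  unfold Claim_changed_over_lap_center; decide

theorem over_lap_center_tight : Claim_exact_over_lap_center := by
  intro word positon direction _ hD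
  obtain ⟨r, c⟩ := positon
  obtain ⟨hd, hr, hc, hlen⟩ := hD
  have hr' : r = 7 := hr
  have hc' : c < 7 := hc
  have hlen' : (7:Int) < c + word.toList.length := by have := hlen; omega
  subst hr'
  unfold over_lap_center over_lap_center_alt
  rw [olcLoopA_nd _ _ _ hd]
  have h0 : word.toList.length ≠ 0 := by
    intro h; rw [h] at hlen'; simp at hlen'; omega
  rw [if_neg h0, if_neg hd]
  intro heq
  rw [decide_eq_decide] at heq
  have hB := heq.mpr ⟨rfl, by show c ≤ 7; omega, hlen'⟩
  have hc7 : c = 7 := congrArg Prod.snd hB.2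
  omega
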